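-- pv_equiv track=rewrite | github.com/clare-arrington/masking | wsi/wsi_clustering.py | remap_senses
-- ===== SOURCE A (Python) =====
-- from collections import Counter, defaultdict
--
-- def remap_senses(sense_remapping, clusters):
--     remapped_clusters = defaultdict(list)
--     for sense_num, cluster in clusters.items():
--         remapped_sense = sense_remapping[sense_num]
--         remapped_clusters[remapped_sense].extend(cluster)
--
--     clusters = {}
--     for sense_num, cluster in enumerate(remapped_clusters.values()):
--         clusters[sense_num] = cluster
--
--     return clusters
-- ===== SOURCE B (Python) =====
-- def remap_senses(sense_remapping, clusters):
--     keys = [sense_remapping[s] for s in clusters]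
--     order = list(dict.fromkeys(keys))
--     vals = list(clusters.values())
--     return {i: [x for k, c in zip(keys, vals) if k == r for x in c]
--             for i, r in enumerate(order)}
-- ===== Notes on version B (the rewrite author's own statement) =====
-- stated objective: alternative
-- what changed: A incrementally builds a defaultdict keyed by remapped sense (extending per cluster) and then renumbers its values; B never builds a grouping dict: it computes the remapped-key list, takes its first-appearance distinct order, and produces each output list by a separate filter-and-flatten scan of all clusters per distinct key.
import Mathlib
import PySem

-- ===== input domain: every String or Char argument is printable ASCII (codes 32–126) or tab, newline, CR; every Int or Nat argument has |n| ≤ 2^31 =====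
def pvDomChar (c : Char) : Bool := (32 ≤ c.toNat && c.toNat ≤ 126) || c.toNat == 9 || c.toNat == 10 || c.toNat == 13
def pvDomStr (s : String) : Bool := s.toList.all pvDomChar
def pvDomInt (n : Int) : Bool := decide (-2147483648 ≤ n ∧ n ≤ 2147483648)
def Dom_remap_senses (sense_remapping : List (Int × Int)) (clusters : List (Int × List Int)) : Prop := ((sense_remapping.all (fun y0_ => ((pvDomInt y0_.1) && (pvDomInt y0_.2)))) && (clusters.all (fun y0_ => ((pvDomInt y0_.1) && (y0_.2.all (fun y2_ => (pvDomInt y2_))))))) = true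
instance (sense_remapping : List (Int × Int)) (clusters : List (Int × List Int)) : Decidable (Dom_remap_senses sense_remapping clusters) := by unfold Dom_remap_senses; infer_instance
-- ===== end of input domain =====

-- B avoids A's incremental grouping dict: it computes the remapped-key list, its
-- first-appearance distinct order, and builds each output list by a filter-and-flatten
-- scan of all clusters per distinct key (objective: alternative; not faster).

-- ===== PORT A =====
-- the grouping loop: `for sense_num, cluster in clusters.items(): remapped_clusters[sense_remapping[sense_num]].extend(cluster)`;
-- `none` = KeyError on `sense_remapping[sense_num]` (excluded by Pre_)
def remapLoopA (srd : PySem.Dict Int Int) :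
    List (Int × List Int) → PySem.Dict Int (List Int) → Option (PySem.Dict Int (List Int))
  | [], d => some d
  | p :: rest, d =>
    match srd.get? p.1 with
    | none => none
    | some rs => remapLoopA srd rest (d.modify rs [] (· ++ p.2))

def remap_senses (sense_remapping : List (Int × Int)) (clusters : List (Int × List Int)) : List (Int × List Int) :=
  match remapLoopA (PySem.Dict.ofList sense_remapping) (PySem.Dict.ofList clusters).items PySem.Dict.empty with
  | none => []  -- unreachable under Pre_ (KeyError in Python)
  | some rc =>
    -- `for sense_num, cluster in enumerate(remapped_clusters.values()): clusters[sense_num] = cluster`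
    (rc.values.zipIdx).map (fun p => ((p.2 : Int), p.1))

-- ===== PORT B =====
-- `keys = [sense_remapping[s] for s in clusters]`; `none` = KeyError (excluded by Pre_)
def keysOfB (srd : PySem.Dict Int Int) : List (Int × List Int) → Option (List Int)
  | [] => some []
  | p :: rest =>
    match srd.get? p.1 with
    | none => none
    | some k => (keysOfB srd rest).map (k :: ·)

def remap_senses_alt (sense_remapping : List (Int × Int)) (clusters : List (Int × List Int)) : List (Int × List Int) :=
  let cld := PySem.Dict.ofList clusters
  match keysOfB (PySem.Dict.ofList sense_remapping) cld.items with
  | none => []  -- unreachable under Pre_ (KeyError in Python)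
  | some keys =>
    let order := PySem.List.dedup keys          -- list(dict.fromkeys(keys))
    let vals := cld.values
    -- {i: [x for k, c in zip(keys, vals) if k == r for x in c] for i, r in enumerate(order)}
    order.zipIdx.map (fun q =>
      ((q.2 : Int), ((keys.zip vals).filter (fun p => p.1 == q.1)).flatMap (fun p => p.2)))

-- ===== PRECONDITION & SPEC =====
-- Pre_ excludes exactly the inputs where `sense_remapping[sense_num]` raises KeyError in
-- Python: some cluster key missing from sense_remapping.
def Pre_remap_senses (sense_remapping : List (Int × Int)) (clusters : List (Int × List Int)) : Prop :=
  ∀ p ∈ clusters, p.1 ∈ sense_remapping.map Prod.fst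
instance (sense_remapping : List (Int × Int)) (clusters : List (Int × List Int)) : Decidable (Pre_remap_senses sense_remapping clusters) := by unfold Pre_remap_senses; infer_instance

def pvWitness_remap_senses : (List (Int × Int)) × (List (Int × List Int)) :=
  ([(0, 5), (1, 5), (2, 7)], [(0, [10, 11]), (1, [12]), (2, [13])])

def Spec_remap_senses (sense_remapping : List (Int × Int)) (clusters : List (Int × List Int)) (out : List (Int × List Int)) : Prop := out = remap_senses_alt sense_remapping clusters
instance (sense_remapping : List (Int × Int)) (clusters : List (Int × List Int)) (out : List (Int × List Int)) : Decidable (Spec_remap_senses sense_remapping clusters out) := by unfold Spec_remap_senses; infer_instance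

-- ===== CLAIM (what is proved, stated in full; the proofs are below) =====
def Claim_equal_remap_senses : Prop := ∀ (sense_remapping : List (Int × Int)) (clusters : List (Int × List Int)), Dom_remap_senses sense_remapping clusters → Pre_remap_senses sense_remapping clusters → Spec_remap_senses sense_remapping clusters (remap_senses sense_remapping clusters)

-- ===== LEMMAS AND PROOFS =====

-- the grouping step of A's loop
def extStep (d : PySem.Dict Int (List Int)) (p : Int × List Int) : PySem.Dict Int (List Int) :=
  d.modify p.1 [] (· ++ p.2)

theorem keysOfB_isSome (srd : PySem.Dict Int Int) :
    ∀ (l : List (Int × List Int)), (∀ p ∈ l, (srd.get? p.1).isSome) →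
    ∃ keys, keysOfB srd l = some keys := by
  intro l
  induction l with
  | nil => intro _; exact ⟨[], rfl⟩
  | cons p rest ih =>
    intro h
    have hp := h p (List.mem_cons_self)
    cases hs : srd.get? p.1 with
    | none => rw [hs] at hp; simp at hp
    | some k =>
      obtain ⟨ks, hks⟩ := ih (fun q hq => h q (List.mem_cons_of_mem _ hq))
      exact ⟨k :: ks, by simp [keysOfB, hs, hks]⟩

theorem keysOfB_length (srd : PySem.Dict Int Int) :
    ∀ (l : List (Int × List Int)) (keys : List Int), keysOfB srd l = some keys →
    keys.length = l.length := by
  intro l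
  induction l with
  | nil => intro keys h; simp [keysOfB] at h; simp [← h]
  | cons p rest ih =>
    intro keys h
    simp only [keysOfB] at h
    cases hs : srd.get? p.1 with
    | none => rw [hs] at h; simp at h
    | some k =>
      rw [hs] at h
      cases hks : keysOfB srd rest with
      | none => rw [hks] at h; simp at h
      | some ks =>
        rw [hks] at h
        simp only [Option.map_some, Option.some.injEq] at h
        subst h
        simp [ih ks hks]

theorem loopA_eq_fold (srd : PySem.Dict Int Int) :
    ∀ (l : List (Int × List Int)) (keys : List Int) (d : PySem.Dict Int (List Int)),
    keysOfB srd l = some keys →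
    remapLoopA srd l d = some ((keys.zip (l.map Prod.snd)).foldl extStep d) := by
  intro l
  induction l with
  | nil => intro keys d h; simp [keysOfB] at h; simp [remapLoopA, ← h]
  | cons p rest ih =>
    intro keys d h
    simp only [keysOfB] at h
    cases hs : srd.get? p.1 with
    | none => rw [hs] at h; simp at h
    | some k =>
      rw [hs] at h
      cases hks : keysOfB srd rest with
      | none => rw [hks] at h; simp at h
      | some ks =>
        rw [hks] at h
        simp only [Option.map_some, Option.some.injEq] at h
        subst h
        simp only [remapLoopA, hs, List.map_cons, List.zip_cons_cons, List.foldl_cons]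
        exact ih ks (extStep d (k, p.2)) hks

theorem getD_fold_ext :
    ∀ (ps : List (Int × List Int)) (d : PySem.Dict Int (List Int)) (c : Int),
    (ps.foldl extStep d).getD c [] = d.getD c [] ++ (ps.filter (fun p => p.1 == c)).flatMap (fun p => p.2) := by
  intro ps
  induction ps with
  | nil => intro d c; simp
  | cons p rest ih =>
    intro d c
    simp only [List.foldl_cons, List.filter_cons]
    rw [ih]
    by_cases hc : p.1 = c
    · simp [extStep, hc, PySem.Dict.getD_modify]
    · have : (p.1 == c) = false := by simp [hc]
      simp [extStep, this, PySem.Dict.getD_modify, Ne.symm hc]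

theorem mem_items_ofList_key (cl : List (Int × List Int)) (p : Int × List Int)
    (h : p ∈ (PySem.Dict.ofList cl).items) : p.1 ∈ cl.map Prod.fst := by
  have hk : p.1 ∈ (PySem.Dict.ofList cl).keys := by
    simp only [PySem.Dict.keys]
    exact List.mem_map.mpr ⟨p, h, rfl⟩
  rw [show PySem.Dict.ofList cl = PySem.Dict.empty.update cl from rfl] at hk
  rw [show PySem.Dict.update PySem.Dict.empty cl
        = cl.foldl (fun acc p => acc.insert p.1 p.2) PySem.Dict.empty from rfl] at hk
  rw [PySem.Dict.keys_foldl_insert_key cl Prod.fst (fun _ p => p.2) PySem.Dict.empty] at hk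
  have := (PySem.Set.mem_update _ _ _).mp hk
  simpa [PySem.Dict.keys_empty] using this

theorem contains_ofList_of_mem (sr : List (Int × Int)) (k : Int)
    (h : k ∈ sr.map Prod.fst) : (PySem.Dict.ofList sr).contains k = true := by
  apply (PySem.Dict.contains_iff_mem_keys _ _).mpr
  rw [show PySem.Dict.ofList sr = PySem.Dict.empty.update sr from rfl]
  rw [show PySem.Dict.update PySem.Dict.empty sr
        = sr.foldl (fun acc p => acc.insert p.1 p.2) PySem.Dict.empty from rfl]
  rw [PySem.Dict.keys_foldl_insert_key sr Prod.fst (fun _ p => p.2) PySem.Dict.empty]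
  exact (PySem.Set.mem_update _ _ _).mpr (Or.inr h)

theorem fold_keys (keys : List Int) (vals : List (List Int)) (hlen : keys.length = vals.length) :
    ((keys.zip vals).foldl extStep PySem.Dict.empty).keys = PySem.List.dedup keys := by
  have h := PySem.Dict.keys_foldl_modify_key (keys.zip vals) Prod.fst []
      (fun _ p => (· ++ p.2)) PySem.Dict.empty
  have hmap : (keys.zip vals).map Prod.fst = keys :=
    List.map_fst_zip (le_of_eq hlen)
  calc (List.foldl extStep PySem.Dict.empty (keys.zip vals)).keys
      = PySem.Set.update PySem.Dict.empty.keys ((keys.zip vals).map Prod.fst) := h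
    _ = PySem.List.dedup keys := by rw [hmap]; rfl

theorem fold_keys_nodup (keys : List Int) (vals : List (List Int)) :
    ((keys.zip vals).foldl extStep PySem.Dict.empty).keys.Nodup := by
  exact PySem.Dict.nodup_keys_foldl_modify_key (keys.zip vals) Prod.fst []
    (fun _ p => (· ++ p.2)) PySem.Dict.empty (by simp [PySem.Dict.keys_empty])

-- ===== VERDICT (by name: the statement is the Claim_ definition above) =====
theorem remap_senses_spec : Claim_equal_remap_senses := by
  intro sr cl _hdom hpre
  unfold Spec_remap_senses remap_senses remap_senses_alt
  have hsome : ∀ p ∈ (PySem.Dict.ofList cl).items, ((PySem.Dict.ofList sr).get? p.1).isSome := by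
    intro p hp
    have h1 := mem_items_ofList_key cl p hp
    have h2 : (PySem.Dict.ofList sr).contains p.1 = true := by
      apply contains_ofList_of_mem
      obtain ⟨q, hq, hqe⟩ := List.mem_map.mp h1
      exact hqe ▸ hpre q hq
    cases hg : (PySem.Dict.ofList sr).get? p.1 with
    | none => rw [PySem.Dict.get?_eq_none_iff_contains] at hg; rw [hg] at h2; simp at h2
    | some v => rfl
  obtain ⟨keys, hkeys⟩ := keysOfB_isSome _ _ hsome
  have hlen : keys.length = ((PySem.Dict.ofList cl).items.map Prod.snd).length := by
    simp [keysOfB_length _ _ keys hkeys]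
  rw [loopA_eq_fold _ _ keys PySem.Dict.empty hkeys]
  simp only [hkeys]
  have hnodup := fold_keys_nodup keys ((PySem.Dict.ofList cl).items.map Prod.snd)
  have hk := fold_keys keys ((PySem.Dict.ofList cl).items.map Prod.snd) hlen
  have hgetD : ∀ c, (List.foldl extStep PySem.Dict.empty
      (keys.zip ((PySem.Dict.ofList cl).items.map Prod.snd))).getD c []
      = ((keys.zip ((PySem.Dict.ofList cl).items.map Prod.snd)).filter
          (fun p => p.1 == c)).flatMap (fun p => p.2) := by
    intro c
    rw [getD_fold_ext]
    simp
  rw [PySem.Dict.values_eq_map_keys _ hnodup [], hk]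
  rw [show (PySem.Dict.ofList cl).values = (PySem.Dict.ofList cl).items.map Prod.snd from rfl]
  rw [List.zipIdx_map, List.map_map]
  apply List.map_congr_left
  intro q _
  simp [hgetD q.1, Prod.map]
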